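-- pv_equiv track=rewrite | github.com/chlendyd7/Algorithm | 리뉴얼/2024/프로그래머스/12/fifth/30/new/과일 장수.py | solution
-- ===== SOURCE A (Python) =====
-- from collections import Counter
--
-- def solution(k, m, score):
--     counter = Counter(score)
--     counter_lst = sorted(counter.items(), key=lambda x: -x[0])
--
--     answer = 0
--     current_box = []  # 현재 상자에 담긴 사과 점수
--
--     for price, num in counter_lst:
--         while num > 0:  # 현재 점수 그룹의 사과를 처리
--             current_box.append(price)
--             num -= 1
--
--             # 상자가 꽉 찼을 때 처리
--             if len(current_box) == m:
--                 answer += min(current_box) * m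
--                 current_box = []  # 상자를 초기화
--
--     return answer
-- ===== SOURCE B (Python) =====
-- from collections import Counter
--
-- def solution(k, m, score):
--     # Per-group arithmetic: each full box closed while processing a price group
--     # has that price as its minimum, so contributions are computed with // and %
--     # instead of expanding apples one by one. With a non-positive box size no
--     # box can ever be filled.
--     if m <= 0:
--         return 0
--     answer = 0
--     carry = 0  # apples left in the open box
--     for price, num in sorted(Counter(score).items(), key=lambda x: -x[0]):
--         total = carry + num
--         answer += total // m * price * m
--         carry = total % m
--     return answer
-- ===== Notes on version B (the rewrite author's own statement) =====
-- stated objective: alternative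
-- what changed: B replaces A's per-apple expansion loop (append each apple to the box, take min() of every full box) with per-group arithmetic: for each distinct score, descending, it computes the number of boxes closed in that group with // and the leftover with %, since every box closed during a group has that group's score as its minimum.
import Mathlib
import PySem

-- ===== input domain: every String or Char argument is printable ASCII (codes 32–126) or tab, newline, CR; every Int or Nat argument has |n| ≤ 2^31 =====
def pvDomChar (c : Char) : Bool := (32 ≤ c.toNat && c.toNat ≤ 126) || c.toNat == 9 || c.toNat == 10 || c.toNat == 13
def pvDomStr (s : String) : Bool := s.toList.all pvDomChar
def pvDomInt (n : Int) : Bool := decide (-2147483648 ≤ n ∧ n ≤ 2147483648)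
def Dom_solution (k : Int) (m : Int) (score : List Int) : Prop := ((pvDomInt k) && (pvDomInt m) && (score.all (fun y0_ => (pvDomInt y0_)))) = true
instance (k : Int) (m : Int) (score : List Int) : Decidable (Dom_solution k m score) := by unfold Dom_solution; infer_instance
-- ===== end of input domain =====

-- B computes each full box's contribution arithmetically per price group (// and %) instead of expanding apples one by one (objective: alternative).


-- ===== PORT A =====
-- the inner `while num > 0` loop: num decreases by 1 each pass, so it runs
-- exactly num.toNat times (0 times when num ≤ 0, exactly as Python).
def aGroup (m price : Int) : Nat → Int × List Int → Int × List Int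
  | 0, st => st
  | n+1, (answer, box) =>
    let box := box ++ [price]
    if (box.length : Int) = m then
      aGroup m price n (answer + ((PySem.List.min? box (fun x => x)).getD 0) * m, [])
    else
      aGroup m price n (answer, box)

def solution (k : Int) (m : Int) (score : List Int) : Int :=
  let counter := PySem.Dict.counter score
  let counter_lst := PySem.List.sorted counter.items (fun x => -x.1) false
  (counter_lst.foldl (fun st pn => aGroup m pn.1 pn.2.toNat st) (0, ([] : List Int))).1

-- ===== PORT B =====
def solution_alt (k : Int) (m : Int) (score : List Int) : Int :=
  if m ≤ 0 then 0
  else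
    let pairs := PySem.List.sorted (PySem.Dict.counter score).items (fun x => -x.1) false
    (pairs.foldl (fun (st : Int × Int) pn =>
        let total := st.2 + pn.2
        (st.1 + PySem.Int.floordiv total m * pn.1 * m, PySem.Int.mod total m))
      ((0 : Int), (0 : Int))).1

-- ===== PRECONDITION & SPEC =====
def Spec_solution (k : Int) (m : Int) (score : List Int) (out : Int) : Prop := out = solution_alt k m score
instance (k : Int) (m : Int) (score : List Int) (out : Int) : Decidable (Spec_solution k m score out) := by unfold Spec_solution; infer_instance

-- ===== CLAIM (what is proved, stated in full; the proofs are below) =====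
def Claim_equal_solution : Prop := ∀ (k : Int) (m : Int) (score : List Int), Dom_solution k m score → Spec_solution k m score (solution k m score)

-- ===== LEMMAS AND PROOFS =====

-- with m ≤ 0 a box of positive length never matches, so the answer never changes
lemma aGroup_nonpos (m price : Int) (hm : m ≤ 0) :
    ∀ (n : Nat) (ans : Int) (box : List Int), ∃ box', aGroup m price n (ans, box) = (ans, box') := by
  intro n
  induction n with
  | zero => intro ans box; exact ⟨box, rfl⟩
  | succ n ih =>
    intro ans box
    simp only [aGroup]
    split_ifs with h
    · exfalso
      simp only [List.length_append, List.length_cons, List.length_nil] at h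
      omega
    · exact ih ans (box ++ [price])

lemma min?_of_min_mem (xs : List Int) (p : Int) (hmem : p ∈ xs) (hmin : ∀ x ∈ xs, p ≤ x) :
    PySem.List.min? xs (fun x => x) = some p := by
  rcases h : PySem.List.min? xs (fun x => x) with _ | q
  · rw [PySem.List.min?_eq_none_iff] at h
    subst h; simp at hmem
  · have h1 : q ∈ xs := PySem.List.min?_mem h
    have h2 : q ≤ p := PySem.List.min?_isMin h p hmem
    have h3 : p ≤ q := hmin q h1
    rw [le_antisymm h2 h3]

-- the while loop over one price group, arithmetically
lemma aGroup_spec (m price : Int) (hm : 0 < m) :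
    ∀ (n : Nat) (ans : Int) (box : List Int),
      (box.length : Int) < m → (∀ x ∈ box, price ≤ x) →
      ∃ box',
        aGroup m price n (ans, box)
          = (ans + PySem.Int.floordiv ((box.length : Int) + n) m * price * m, box')
        ∧ (box'.length : Int) = PySem.Int.mod ((box.length : Int) + n) m
        ∧ (∀ x ∈ box', price ≤ x) := by
  intro n
  induction n with
  | zero =>
    intro ans box hlen hall
    have hz : (box.length : Int) + ((0 : Nat) : Int) = (box.length : Int) := by push_cast; ring
    refine ⟨box, ?_, ?_, hall⟩
    · have h0 : PySem.Int.floordiv ((box.length : Int) + ((0 : Nat) : Int)) m = 0 := by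
        rw [hz, PySem.Int.floordiv_eq_ediv_of_pos hm]
        exact Int.ediv_eq_zero_of_lt (Int.natCast_nonneg _) hlen
      simp only [aGroup]
      rw [h0]
      norm_num
    · rw [PySem.Int.mod_eq_emod_of_pos hm, hz]
      exact (Int.emod_eq_of_lt (Int.natCast_nonneg _) hlen).symm
  | succ n ih =>
    intro ans box hlen hall
    have hall1 : ∀ x ∈ box ++ [price], price ≤ x := by
      intro x hx
      rcases List.mem_append.mp hx with h | h
      · exact hall x h
      · simp at h; omega
    simp only [aGroup]
    split_ifs with hfull
    · -- box closes: its minimum is price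
      have hl : (box.length : Int) + 1 = m := by
        simp only [List.length_append, List.length_cons, List.length_nil] at hfull
        push_cast at hfull; omega
      have hminv : (PySem.List.min? (box ++ [price]) (fun x => x)).getD 0 = price := by
        rw [min?_of_min_mem (box ++ [price]) price (by simp) hall1]; rfl
      obtain ⟨box', h1, h2, h3⟩ := ih (ans + price * m) [] (by exact_mod_cast hm) (by simp)
      have harg : ((([] : List Int).length : Int) + (n : Int)) = (n : Int) := by simp
      have e2 : PySem.Int.floordiv ((box.length : Int) + ((n + 1 : Nat) : Int)) m
          = PySem.Int.floordiv (n : Int) m + 1 := by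
        rw [PySem.Int.floordiv_eq_ediv_of_pos hm, PySem.Int.floordiv_eq_ediv_of_pos hm]
        have h : (box.length : Int) + ((n + 1 : Nat) : Int) = (n : Int) + 1 * m := by
          push_cast; omega
        rw [h, Int.add_mul_ediv_right _ _ (by omega : m ≠ 0)]
      have e3 : PySem.Int.mod ((box.length : Int) + ((n + 1 : Nat) : Int)) m
          = PySem.Int.mod (n : Int) m := by
        rw [PySem.Int.mod_eq_emod_of_pos hm, PySem.Int.mod_eq_emod_of_pos hm]
        have h : (box.length : Int) + ((n + 1 : Nat) : Int) = (n : Int) + m * 1 := by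
          push_cast; omega
        rw [h, Int.add_mul_emod_self_left]
      refine ⟨box', ?_, ?_, h3⟩
      · rw [hminv, h1, harg, e2]; ring_nf
      · rw [h2, harg, e3]
    · -- box stays open
      have hlen1 : (((box ++ [price]).length : Int)) < m := by
        simp only [List.length_append, List.length_cons, List.length_nil] at hfull ⊢
        push_cast at hfull ⊢; omega
      obtain ⟨box', h1, h2, h3⟩ := ih ans (box ++ [price]) hlen1 hall1
      have harg : (((box ++ [price]).length : Int) + (n : Int))
          = ((box.length : Int) + ((n + 1 : Nat) : Int)) := by
        simp only [List.length_append, List.length_cons, List.length_nil]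
        push_cast; ring
      rw [harg] at h1 h2
      exact ⟨box', h1, h2, h3⟩

-- the whole descending group list: A's state (ans, box) tracks B's state (ans, box.length)
lemma foldl_groups (m : Int) (hm : 0 < m) :
    ∀ (L : List (Int × Int)) (ans : Int) (box : List Int),
      (box.length : Int) < m →
      L.Pairwise (fun a b => b.1 ≤ a.1) →
      (∀ p ∈ L, 0 ≤ p.2) →
      (∀ x ∈ box, ∀ p ∈ L, p.1 ≤ x) →
      (L.foldl (fun st pn => aGroup m pn.1 pn.2.toNat st) (ans, box)).1
        = (L.foldl (fun (st : Int × Int) pn =>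
            let total := st.2 + pn.2
            (st.1 + PySem.Int.floordiv total m * pn.1 * m, PySem.Int.mod total m))
            (ans, (box.length : Int))).1 := by
  intro L
  induction L with
  | nil => intro ans box _ _ _ _; rfl
  | cons hd tl ih =>
    intro ans box hlen hpw hnn hbd
    obtain ⟨box', h1, h2, h3⟩ :=
      aGroup_spec m hd.1 hm hd.2.toNat ans box hlen
        (fun x hx => hbd x hx hd (by simp))
    have hnum : ((hd.2.toNat : Nat) : Int) = hd.2 := Int.toNat_of_nonneg (hnn hd (by simp))
    rw [hnum] at h1 h2
    have hlt : (box'.length : Int) < m := by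
      rw [h2, PySem.Int.mod_eq_emod_of_pos hm]
      exact Int.emod_lt_of_pos _ hm
    have hpw' : tl.Pairwise (fun a b => b.1 ≤ a.1) := hpw.of_cons
    have hhd : ∀ p ∈ tl, p.1 ≤ hd.1 := fun p hp => List.rel_of_pairwise_cons hpw hp
    simp only [List.foldl_cons]
    rw [h1]
    rw [ih (ans + PySem.Int.floordiv ((box.length : Int) + hd.2) m * hd.1 * m) box' hlt hpw'
        (fun p hp => hnn p (by simp [hp]))
        (fun x hx p hp => le_trans (hhd p hp) (h3 x hx))]
    rw [h2]

lemma sorted_counter_props (score : List Int) :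
    (PySem.List.sorted (PySem.Dict.counter score).items (fun x => -x.1) false).Pairwise
        (fun a b => b.1 ≤ a.1) ∧
    (∀ p ∈ PySem.List.sorted (PySem.Dict.counter score).items (fun x => -x.1) false, 0 ≤ p.2) := by
  constructor
  · have := PySem.List.sorted_pairwise (PySem.Dict.counter score).items (fun x => -x.1)
    exact this.imp (fun h => by omega)
  · intro p hp
    have hp' : p ∈ (PySem.Dict.counter score).items := (PySem.List.mem_sorted _ _ _ _).mp hp
    rw [PySem.Dict.items_counter] at hp'
    obtain ⟨q, _, rfl⟩ := List.mem_map.mp hp'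
    exact Int.natCast_nonneg _

-- ===== VERDICT (by name: the statement is the Claim_ definition above) =====
theorem solution_spec : Claim_equal_solution := by
  intro k m score _
  unfold Spec_solution solution solution_alt
  by_cases hm : m ≤ 0
  · simp only [if_pos hm]
    suffices h : ∀ (L : List (Int × Int)) (ans : Int) (box : List Int),
        (L.foldl (fun st pn => aGroup m pn.1 pn.2.toNat st) (ans, box)).1 = ans by
      exact h _ 0 []
    intro L
    induction L with
    | nil => intro ans box; rfl
    | cons hd tl ihL =>
      intro ans box
      obtain ⟨box', hb⟩ := aGroup_nonpos m hd.1 hm hd.2.toNat ans box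
      simp only [List.foldl_cons, hb]
      exact ihL ans box'
  · have hm' : 0 < m := by omega
    simp only [if_neg hm]
    obtain ⟨hpw, hnn⟩ := sorted_counter_props score
    have := foldl_groups m hm'
      (PySem.List.sorted (PySem.Dict.counter score).items (fun x => -x.1) false)
      0 [] (by exact_mod_cast hm') hpw hnn (by simp)
    simpa using this
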